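-- pv_equiv track=rewrite | github.com/da-bear/suanfa | data_structure/滑动窗口算法/395.至少有 K 个重复字符的最长子串.py | longestKLetterSubstr
-- ===== SOURCE A (Python) =====
-- def longestKLetterSubstr(s, k, count):
--     """
--     :param s: 目标字符串
--     :param k: 字符重复数k
--     :param count: 窗口中的字符种类限制
--     :return:
--     """
--     # 窗口指针
--     left = right = 0
--     # 记录答案
--     res = 0
--     # 列表list存储字符字符出现次数
--     windowCharCount = [0 for _ in range(26)]
--     # 窗口中的字符种类 > count 时候缩小窗口
--     windowCharCategory = 0
--     # 记录窗口中有几种字符的出现次数达标（大于等于k）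
--     windowValidCount = 0
--
--     while right < len(s):
--         c = s[right]
--         if windowCharCount[ord(c) - ord("a")] == 0:
--             # 新增一种字符
--             windowCharCategory += 1
--         # 该字符数加1
--         windowCharCount[ord(c) - ord("a")] += 1
--         # 如果字符数等于k
--         if windowCharCount[ord(c) - ord("a")] == k:
--             windowValidCount += 1
--
--         right += 1
--
--         while windowCharCategory > count:
--             d = s[left]
--             if windowCharCount[ord(d) - ord("a")] == k:
--                 windowValidCount -= 1
--             windowCharCount[ord(d) - ord("a")] -= 1
--             # 窗口中的字符少一种
--             if windowCharCount[ord(d) - ord("a")] == 0: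
--                 windowCharCategory -= 1
--
--             left += 1
--         # 当窗口中字符种类为 count 且每个字符出现次数都满足 k 时，更新答案
--         if windowValidCount == count:
--             res = max(res, right - left)
--
--     return res
-- ===== SOURCE B (Python) =====
-- def longestKLetterSubstr(s, k, count):
--     # Brute force over all window start positions: for each start i, extend the
--     # end j rightwards, maintaining a 26-cell count array, a distinct-kind count
--     # and a count of kinds that reached k; record every window with exactly
--     # `count` kinds all reaching k.
--     n = len(s)
--     res = 0
--     for i in range(n):
--         cnt = [0] * 26
--         distinct = 0
--         valid = 0
--         for j in range(i, n):
--             idx = ord(s[j]) - ord("a")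
--             if cnt[idx] == 0:
--                 distinct += 1
--             cnt[idx] += 1
--             if cnt[idx] == k:
--                 valid += 1
--             if distinct == count and valid == count:
--                 res = max(res, j + 1 - i)
--     return res
-- ===== Notes on version B (the rewrite author's own statement) =====
-- stated objective: alternative
-- what changed: Replaces the incremental two-pointer sliding window (shared state, shrink loop) by an exhaustive nested scan: for every start index a fresh 26-cell counter is built and every window extending from it is tested directly for 'exactly count kinds, each reaching k'.
import Mathlib
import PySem

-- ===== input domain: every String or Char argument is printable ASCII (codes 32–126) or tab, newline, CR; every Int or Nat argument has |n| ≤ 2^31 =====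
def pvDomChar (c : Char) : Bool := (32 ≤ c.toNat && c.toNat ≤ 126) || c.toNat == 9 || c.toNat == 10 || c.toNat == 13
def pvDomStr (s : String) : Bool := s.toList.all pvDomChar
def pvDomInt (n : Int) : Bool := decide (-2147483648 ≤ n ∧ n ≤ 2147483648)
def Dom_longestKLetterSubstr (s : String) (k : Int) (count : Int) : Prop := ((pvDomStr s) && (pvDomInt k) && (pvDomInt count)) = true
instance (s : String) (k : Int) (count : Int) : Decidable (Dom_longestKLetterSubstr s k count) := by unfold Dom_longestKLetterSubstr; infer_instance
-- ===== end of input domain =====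

-- B replaces A's incremental two-pointer sliding window by an exhaustive nested scan over all
-- window start positions (alternative algorithm, not faster); return values agree on Pre_.

-- ===== PORT A =====
-- inner `while windowCharCategory > count` loop of A; fuel only makes the recursion structural
-- (where Python would raise IndexError at s[left], cs[left]? is none and we stop: outside Pre_).
def pvAInner (cs : List Char) (k count : Int) : Nat → Nat → List Int → Int → Int → (Nat × List Int × Int × Int)
  | 0, left, w, cat, val => (left, w, cat, val)
  | fuel+1, left, w, cat, val =>
    if count < cat then
      match cs[left]? with
      | none => (left, w, cat, val)
      | some d =>
        let i : Int := (d.toNat : Int) - 97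
        let val1 := if PySem.List.pyGetD w i 0 = k then val - 1 else val
        let w1 := PySem.List.pySetD w i (PySem.List.pyGetD w i 0 - 1)
        let cat1 := if PySem.List.pyGetD w1 i 0 = 0 then cat - 1 else cat
        pvAInner cs k count fuel (left+1) w1 cat1 val1
    else (left, w, cat, val)

-- outer `while right < len(s)` loop of A; `gas` (enough fuel for the remaining iterations)
-- only makes the recursion structural
def pvAOuter (cs : List Char) (k count : Int) : Nat → Nat → Nat → List Int → Int → Int → Int → Int
  | 0, _, _, _, _, _, res => res
  | gas + 1, right, left, w, cat, val, res =>
    if h : right < cs.length then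
      let c := cs[right]'h
      let i : Int := (c.toNat : Int) - 97
      let cat1 := if PySem.List.pyGetD w i 0 = 0 then cat + 1 else cat
      let w1 := PySem.List.pySetD w i (PySem.List.pyGetD w i 0 + 1)
      let val1 := if PySem.List.pyGetD w1 i 0 = k then val + 1 else val
      match pvAInner cs k count (cs.length + 1) left w1 cat1 val1 with
      | (left2, w2, cat2, val2) =>
        let res2 := if val2 = count then max res ((right : Int) + 1 - (left2 : Int)) else res
        pvAOuter cs k count gas (right + 1) left2 w2 cat2 val2 res2
    else res

def longestKLetterSubstr (s : String) (k : Int) (count : Int) : Int :=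
  pvAOuter s.toList k count s.toList.length 0 0 (List.replicate 26 0) 0 0 0

-- ===== PORT B =====
-- inner `for j in range(i, n)` loop of B (`gas` only makes the recursion structural)
def pvBInner (cs : List Char) (k count : Int) (i : Nat) : Nat → Nat → List Int → Int → Int → Int → Int
  | 0, _, _, _, _, res => res
  | gas + 1, j, cnt, distinct, valid, res =>
    if h : j < cs.length then
      let idx : Int := ((cs[j]'h).toNat : Int) - 97
      let distinct1 := if PySem.List.pyGetD cnt idx 0 = 0 then distinct + 1 else distinct
      let cnt1 := PySem.List.pySetD cnt idx (PySem.List.pyGetD cnt idx 0 + 1)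
      let valid1 := if PySem.List.pyGetD cnt1 idx 0 = k then valid + 1 else valid
      let res1 := if distinct1 = count ∧ valid1 = count then max res ((j : Int) + 1 - (i : Int)) else res
      pvBInner cs k count i gas (j + 1) cnt1 distinct1 valid1 res1
    else res

-- outer `for i in range(n)` loop of B
def pvBOuter (cs : List Char) (k count : Int) : Nat → Nat → Int → Int
  | 0, _, res => res
  | gas + 1, i, res =>
    if h : i < cs.length then
      pvBOuter cs k count gas (i + 1) (pvBInner cs k count i cs.length i (List.replicate 26 0) 0 0 res)
    else res

def longestKLetterSubstr_alt (s : String) (k : Int) (count : Int) : Int :=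
  pvBOuter s.toList k count s.toList.length 0 0

-- ===== PRECONDITION & SPEC =====
-- Pre_ excludes exactly the inputs where A raises IndexError: a character whose index
-- ord(c)-97 misses the 26-cell array even after Python's negative-index wrap (i.e. code
-- outside 71..122), and count < 0 with a non-empty string (the shrink loop then runs the
-- left pointer off the end of the string).
def pvInRange (c : Char) : Bool := decide (71 ≤ c.toNat) && decide (c.toNat ≤ 122)

def Pre_longestKLetterSubstr (s : String) (k : Int) (count : Int) : Prop :=
  s.toList.all pvInRange = true ∧ (0 ≤ count ∨ s.toList = [])
instance (s : String) (k : Int) (count : Int) : Decidable (Pre_longestKLetterSubstr s k count) := by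
  unfold Pre_longestKLetterSubstr; infer_instance

def pvWitness_longestKLetterSubstr : String × Int × Int := ("aabbc", 2, 2)

def Spec_longestKLetterSubstr (s : String) (k : Int) (count : Int) (out : Int) : Prop := out = longestKLetterSubstr_alt s k count
instance (s : String) (k : Int) (count : Int) (out : Int) : Decidable (Spec_longestKLetterSubstr s k count out) := by unfold Spec_longestKLetterSubstr; infer_instance

-- ===== CLAIM (what is proved, stated in full; the proofs are below) =====
def Claim_equal_longestKLetterSubstr : Prop := ∀ (s : String) (k : Int) (count : Int), Dom_longestKLetterSubstr s k count → Pre_longestKLetterSubstr s k count → Spec_longestKLetterSubstr s k count (longestKLetterSubstr s k count)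

-- ===== LEMMAS AND PROOFS =====

-- the 26-array cell a character c lands in: Python's windowCharCount[ord(c)-97] after
-- negative-index wraparound, for 71 ≤ code ≤ 122
def pvCell (c : Char) : Nat := (c.toNat - 71) % 26

def pvGood (c : Char) : Prop := 71 ≤ c.toNat ∧ c.toNat ≤ 122

-- number of occurrences of cell i in t
def pvCnt (t : List Char) (i : Nat) : Nat := t.countP (fun c => decide (pvCell c = i))
-- the count array of window t
def pvHw (t : List Char) : List Int := (List.range 26).map (fun i => (pvCnt t i : Int))
-- number of distinct cells present in t (A's windowCharCategory)
def pvD (t : List Char) : Int := ((List.range 26).countP (fun i => decide (0 < pvCnt t i)) : Nat)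
-- number of cells whose count reached k (A's windowValidCount)
def pvV (k : Int) (t : List Char) : Int :=
  if 1 ≤ k then (((List.range 26).countP (fun i => decide (k ≤ (pvCnt t i : Int)))) : Nat) else 0

def pvWin (cs : List Char) (l r : Nat) : List Char := (cs.drop l).take (r - l)

-- first l' ≥ l with at most `count` distinct cells in window [l', r)
def pvMinFrom (cs : List Char) (count : Int) (l r : Nat) : Nat :=
  if h : l < r then (if count < pvD (pvWin cs l r) then pvMinFrom cs count (l + 1) r else l) else l
termination_by r - l

def pvMinL (cs : List Char) (count : Int) (r : Nat) : Nat := pvMinFrom cs count 0 r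

def pvContribA (cs : List Char) (k count : Int) (r : Nat) : Int :=
  if pvV k (pvWin cs (pvMinL cs count r) r) = count then (r : Int) - (pvMinL cs count r : Int) else 0

def pvContribB (cs : List Char) (k count : Int) (i j : Nat) : Int :=
  if pvD (pvWin cs i j) = count ∧ pvV k (pvWin cs i j) = count then (j : Int) - (i : Int) else 0

lemma pvCell_lt (c : Char) : pvCell c < 26 := Nat.mod_lt _ (by omega)

lemma countP_range_delta (n i0 : Nat) (p q : Nat → Bool) (hi0 : i0 < n)
    (hagree : ∀ i, i ≠ i0 → p i = q i) :
    (((List.range n).countP q : Nat) : Int) =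
      ((List.range n).countP p : Nat) + ((if q i0 then 1 else 0) - (if p i0 then 1 else 0)) := by
  induction n with
  | zero => omega
  | succ m ih =>
    rw [List.range_succ, List.countP_append, List.countP_append]
    by_cases hm : i0 = m
    · subst hm
      have hcong : (List.range i0).countP p = (List.range i0).countP q := by
        apply List.countP_congr
        intro a ha
        rw [hagree a (by have := List.mem_range.mp ha; omega)]
      simp only [List.countP_cons, List.countP_nil, hcong]
      cases hq : q i0 <;> cases hp : p i0 <;> simp [hq, hp] <;> push_cast <;> omega
    · have := ih (by omega)
      have hpq : p m = q m := hagree m (by omega)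
      simp only [List.countP_cons, List.countP_nil, ← hpq]
      cases hp : p m <;> simp [hp] <;> push_cast at this ⊢ <;> omega

lemma pvCnt_append (t : List Char) (c : Char) (i : Nat) :
    pvCnt (t ++ [c]) i = pvCnt t i + (if pvCell c = i then 1 else 0) := by
  simp only [pvCnt, List.countP_append, List.countP_cons, List.countP_nil]
  by_cases h : pvCell c = i <;> simp [h]

lemma pvCnt_cons (t : List Char) (c : Char) (i : Nat) :
    pvCnt (c :: t) i = pvCnt t i + (if pvCell c = i then 1 else 0) := by
  simp only [pvCnt, List.countP_cons]
  by_cases h : pvCell c = i <;> simp [h]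

lemma pvD_append (t : List Char) (c : Char) :
    pvD (t ++ [c]) = pvD t + (if pvCnt t (pvCell c) = 0 then 1 else 0) := by
  have hdelta := countP_range_delta 26 (pvCell c) (fun i => decide (0 < pvCnt t i))
    (fun i => decide (0 < pvCnt (t ++ [c]) i)) (pvCell_lt c)
    (fun i hi => by simp [pvCnt_append, Ne.symm hi])
  simp only [pvD]
  rw [hdelta]
  have h1 : pvCnt (t ++ [c]) (pvCell c) = pvCnt t (pvCell c) + 1 := by simp [pvCnt_append]
  by_cases h : pvCnt t (pvCell c) = 0
  · simp [h1, h]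
  · simp [h1, h, Nat.pos_of_ne_zero h]

lemma pvD_cons (t : List Char) (c : Char) :
    pvD (c :: t) = pvD t + (if pvCnt t (pvCell c) = 0 then 1 else 0) := by
  have hdelta := countP_range_delta 26 (pvCell c) (fun i => decide (0 < pvCnt t i))
    (fun i => decide (0 < pvCnt (c :: t) i)) (pvCell_lt c)
    (fun i hi => by simp [pvCnt_cons, Ne.symm hi])
  simp only [pvD]
  rw [hdelta]
  have h1 : pvCnt (c :: t) (pvCell c) = pvCnt t (pvCell c) + 1 := by simp [pvCnt_cons]
  by_cases h : pvCnt t (pvCell c) = 0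
  · simp [h1, h]
  · simp [h1, h, Nat.pos_of_ne_zero h]

lemma pvV_append (k : Int) (t : List Char) (c : Char) :
    pvV k (t ++ [c]) = pvV k t + (if (pvCnt t (pvCell c) : Int) + 1 = k then 1 else 0) := by
  by_cases hk : 1 ≤ k
  · have hdelta := countP_range_delta 26 (pvCell c) (fun i => decide (k ≤ (pvCnt t i : Int)))
      (fun i => decide (k ≤ (pvCnt (t ++ [c]) i : Int))) (pvCell_lt c)
      (fun i hi => by simp [pvCnt_append, Ne.symm hi])
    simp only [pvV, if_pos hk]
    rw [hdelta]
    simp only []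
    have h1 : pvCnt (t ++ [c]) (pvCell c) = pvCnt t (pvCell c) + 1 := by simp [pvCnt_append]
    simp only [h1]
    by_cases h : (pvCnt t (pvCell c) : Int) + 1 = k
    · have h2 : ¬ (k ≤ (pvCnt t (pvCell c) : Int)) := by omega
      have h3 : (k ≤ ((pvCnt t (pvCell c) + 1 : Nat) : Int)) := by push_cast; omega
      simp [h, h2, h3]
    · have h23 : (k ≤ ((pvCnt t (pvCell c) + 1 : Nat) : Int)) ↔ (k ≤ (pvCnt t (pvCell c) : Int)) := by
        push_cast; omega
      simp only [h, if_false, decide_eq_true_eq]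
      split_ifs <;> omega
  · have h : ¬ ((pvCnt t (pvCell c) : Int) + 1 = k) := by omega
    simp [pvV, hk, h]

lemma pvV_cons (k : Int) (t : List Char) (c : Char) :
    pvV k (c :: t) = pvV k t + (if (pvCnt t (pvCell c) : Int) + 1 = k then 1 else 0) := by
  by_cases hk : 1 ≤ k
  · have hdelta := countP_range_delta 26 (pvCell c) (fun i => decide (k ≤ (pvCnt t i : Int)))
      (fun i => decide (k ≤ (pvCnt (c :: t) i : Int))) (pvCell_lt c)
      (fun i hi => by simp [pvCnt_cons, Ne.symm hi])
    simp only [pvV, if_pos hk]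
    rw [hdelta]
    simp only []
    have h1 : pvCnt (c :: t) (pvCell c) = pvCnt t (pvCell c) + 1 := by simp [pvCnt_cons]
    simp only [h1]
    by_cases h : (pvCnt t (pvCell c) : Int) + 1 = k
    · have h2 : ¬ (k ≤ (pvCnt t (pvCell c) : Int)) := by omega
      have h3 : (k ≤ ((pvCnt t (pvCell c) + 1 : Nat) : Int)) := by push_cast; omega
      simp [h, h2, h3]
    · have h23 : (k ≤ ((pvCnt t (pvCell c) + 1 : Nat) : Int)) ↔ (k ≤ (pvCnt t (pvCell c) : Int)) := by
        push_cast; omega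
      simp only [h, if_false, decide_eq_true_eq]
      split_ifs <;> omega
  · have h : ¬ ((pvCnt t (pvCell c) : Int) + 1 = k) := by omega
    simp [pvV, hk, h]

lemma length_pvHw (t : List Char) : (pvHw t).length = 26 := by simp [pvHw]

lemma pvHw_getD (t : List Char) (i : Nat) (hi : i < 26) :
    (pvHw t).getD i 0 = (pvCnt t i : Int) := by
  rw [List.getD_eq_getElem _ _ (by simp [length_pvHw, hi])]
  simp [pvHw]

lemma pvHw_append (t : List Char) (c : Char) :
    pvHw (t ++ [c]) = (pvHw t).set (pvCell c) ((pvCnt t (pvCell c) : Int) + 1) := by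
  apply List.ext_getElem (by simp [length_pvHw])
  intro n h1 h2
  have h26 : n < 26 := by simpa [length_pvHw] using h1
  rw [List.getElem_set]
  simp only [pvHw, List.getElem_map, List.getElem_range, pvCnt_append]
  by_cases h : pvCell c = n
  · subst h; simp
  · simp [h]

lemma pvHw_uncons (t : List Char) (c : Char) :
    (pvHw (c :: t)).set (pvCell c) ((pvCnt (c :: t) (pvCell c) : Int) - 1) = pvHw t := by
  apply List.ext_getElem (by simp [length_pvHw])
  intro n h1 h2
  have h26 : n < 26 := by simpa [length_pvHw] using h2
  rw [List.getElem_set]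
  simp only [pvHw, List.getElem_map, List.getElem_range, pvCnt_cons]
  by_cases h : pvCell c = n
  · subst h; simp
  · simp [h]

-- the Python index ord(c)-97, read/written with negative-index wraparound, is cell pvCell c
lemma pyGetD_cell (w : List Int) (h26 : w.length = 26) (c : Char) (hc : pvGood c) :
    PySem.List.pyGetD w ((c.toNat : Int) - 97) 0 = w.getD (pvCell c) 0 := by
  obtain ⟨hlo, hhi⟩ := hc
  by_cases h97 : 97 ≤ c.toNat
  · have he : (c.toNat : Int) - 97 = ((c.toNat - 97 : Nat) : Int) := by omega
    rw [he, PySem.List.pyGetD_natCast]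
    have hcell : pvCell c = c.toNat - 97 := by unfold pvCell; omega
    rw [hcell]
  · have he : (c.toNat : Int) - 97 = -(((97 - c.toNat : Nat)) : Int) := by omega
    rw [he, PySem.List.pyGetD_neg_natCast _ _ _ (by omega) (by omega),
      List.getD_eq_getElem _ _ (by rw [h26]; exact pvCell_lt c)]
    have hidx : w.length - (97 - c.toNat) = pvCell c := by unfold pvCell; omega
    simp [hidx]

lemma pySetD_cell (w : List Int) (h26 : w.length = 26) (c : Char) (hc : pvGood c) (v : Int) :
    PySem.List.pySetD w ((c.toNat : Int) - 97) v = w.set (pvCell c) v := by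
  obtain ⟨hlo, hhi⟩ := hc
  by_cases h97 : 97 ≤ c.toNat
  · have he : (c.toNat : Int) - 97 = ((c.toNat - 97 : Nat) : Int) := by omega
    rw [he, PySem.List.pySetD_natCast]
    have hcell : pvCell c = c.toNat - 97 := by unfold pvCell; omega
    rw [hcell]
  · have he : (c.toNat : Int) - 97 = -(((97 - c.toNat : Nat)) : Int) := by omega
    have hidx : w.length - (97 - c.toNat) = pvCell c := by unfold pvCell; omega
    rw [he]
    simp only [PySem.List.pySetD, PySem.List.pySet?, PySem.List.pyIdx?, h26]
    rw [if_neg (by omega), if_pos (by omega)]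
    simp only [Option.map_some, Option.getD_some]
    congr 1
    unfold pvCell
    omega

lemma pvWin_nil (cs : List Char) (l : Nat) : pvWin cs l l = [] := by simp [pvWin]

lemma pvWin_nil' (cs : List Char) (l r : Nat) (h : r ≤ l) : pvWin cs l r = [] := by
  unfold pvWin
  rw [Nat.sub_eq_zero_of_le h, List.take_zero]

lemma pvWin_succ_r (cs : List Char) (l r : Nat) (hl : l ≤ r) (hr : r < cs.length) :
    pvWin cs l (r + 1) = pvWin cs l r ++ [cs[r]] := by
  unfold pvWin
  have h1 : r + 1 - l = (r - l) + 1 := by omega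
  rw [h1, List.take_succ, List.getElem?_drop]
  have h2 : l + (r - l) = r := by omega
  rw [h2, List.getElem?_eq_getElem hr]
  rfl

lemma pvWin_cons (cs : List Char) (l r : Nat) (hlr : l < r) (hr : r ≤ cs.length) :
    pvWin cs l r = cs[l]'(by omega) :: pvWin cs (l + 1) r := by
  unfold pvWin
  rw [List.drop_eq_getElem_cons (by omega)]
  have h1 : r - l = (r - (l + 1)) + 1 := by omega
  rw [h1, List.take_succ_cons]

lemma pvWin_split (cs : List Char) (l m r : Nat) (h1 : l ≤ m) (h2 : m ≤ r) :
    pvWin cs l r = pvWin cs l m ++ pvWin cs m r := by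
  unfold pvWin
  have h3 : r - l = (m - l) + (r - m) := by omega
  rw [h3, List.take_add]
  congr 1
  have h4 : l + (m - l) = m := by omega
  rw [List.drop_drop, h4]

lemma pvV_le_pvD (k : Int) (t : List Char) : pvV k t ≤ pvD t := by
  unfold pvV pvD
  split
  · rename_i hk
    apply Nat.cast_le.mpr
    apply List.countP_mono_left
    intro i _ h
    simp only [decide_eq_true_eq] at h ⊢
    omega
  · exact Int.natCast_nonneg _

lemma pvCnt_app2 (t u : List Char) (i : Nat) : pvCnt (t ++ u) i = pvCnt t i + pvCnt u i := by
  simp [pvCnt, List.countP_append]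

lemma pvD_append_le (t u : List Char) : pvD t ≤ pvD (t ++ u) := by
  unfold pvD
  apply Nat.cast_le.mpr
  apply List.countP_mono_left
  intro i _ h
  simp only [decide_eq_true_eq, pvCnt_app2] at h ⊢
  omega

lemma pvV_le_append_left (k : Int) (t u : List Char) : pvV k u ≤ pvV k (t ++ u) := by
  unfold pvV
  split
  · apply Nat.cast_le.mpr
    apply List.countP_mono_left
    intro i _ h
    simp only [decide_eq_true_eq, pvCnt_app2] at h ⊢
    push_cast at h ⊢
    omega
  · exact le_refl _

lemma pvD_nil : pvD ([] : List Char) = 0 := by simp [pvD, pvCnt]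

lemma pvV_nil (k : Int) : pvV k ([] : List Char) = 0 := by
  unfold pvV
  split
  · rename_i hk
    rw [List.countP_eq_zero.mpr]
    · rfl
    · intro a _
      simp only [pvCnt, List.countP_nil, Nat.cast_zero, decide_eq_true_eq]
      omega
  · rfl

lemma pvHw_nil : pvHw ([] : List Char) = List.replicate 26 0 := by
  decide

-- pvMinFrom properties
lemma pvMinFrom_le (cs : List Char) (count : Int) (l r : Nat) (h : l ≤ r) :
    pvMinFrom cs count l r ≤ r := by
  have aux : ∀ d l' r', r' - l' ≤ d → l' ≤ r' → pvMinFrom cs count l' r' ≤ r' := by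
    intro d
    induction d with
    | zero =>
      intro l' r' h1 h2
      rw [pvMinFrom]
      have hnlt : ¬ l' < r' := by omega
      simp [hnlt, h2]
    | succ d ih =>
      intro l' r' h1 h2
      rw [pvMinFrom]
      split_ifs with hlr hD
      · exact ih (l' + 1) r' (by omega) (by omega)
      · exact h2
      · exact h2
  exact aux (r - l) l r le_rfl h

lemma le_pvMinFrom (cs : List Char) (count : Int) (l r : Nat) :
    l ≤ pvMinFrom cs count l r := by
  have aux : ∀ d l' r', r' - l' ≤ d → l' ≤ pvMinFrom cs count l' r' := by
    intro d
    induction d with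
    | zero =>
      intro l' r' h1
      rw [pvMinFrom]
      split_ifs <;> omega
    | succ d ih =>
      intro l' r' h1
      rw [pvMinFrom]
      split_ifs with hlr hD
      · have := ih (l' + 1) r' (by omega)
        omega
      · exact le_refl _
      · exact le_refl _
  exact aux (r - l) l r le_rfl

lemma pvMinFrom_spec (cs : List Char) (count : Int) (l r : Nat) (h : l ≤ r) (hc : 0 ≤ count) :
    pvD (pvWin cs (pvMinFrom cs count l r) r) ≤ count := by
  have aux : ∀ d l' r', r' - l' ≤ d → l' ≤ r' → pvD (pvWin cs (pvMinFrom cs count l' r') r') ≤ count := by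
    intro d
    induction d with
    | zero =>
      intro l' r' h1 h2
      rw [pvMinFrom]
      have hnlt : ¬ l' < r' := by omega
      rw [dif_neg hnlt, pvWin_nil' cs l' r' (by omega), pvD_nil]
      exact hc
    | succ d ih =>
      intro l' r' h1 h2
      rw [pvMinFrom]
      split_ifs with hlr hD
      · exact ih (l' + 1) r' (by omega) (by omega)
      · omega
      · rw [pvWin_nil' cs l' r' (by omega), pvD_nil]
        exact hc
  exact aux (r - l) l r le_rfl h

lemma pvMinFrom_min (cs : List Char) (count : Int) (l r : Nat) :
    ∀ j, l ≤ j → j < pvMinFrom cs count l r → count < pvD (pvWin cs j r) := by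
  have aux : ∀ d l', r - l' ≤ d → ∀ j, l' ≤ j → j < pvMinFrom cs count l' r → count < pvD (pvWin cs j r) := by
    intro d
    induction d with
    | zero =>
      intro l' h1 j hj1 hj2
      rw [pvMinFrom] at hj2
      have hnlt : ¬ l' < r := by omega
      rw [dif_neg hnlt] at hj2
      omega
    | succ d ih =>
      intro l' h1 j hj1 hj2
      rw [pvMinFrom] at hj2
      split_ifs at hj2 with hlr hD
      · by_cases hjl : j = l'
        · subst hjl; exact hD
        · exact ih (l' + 1) (by omega) j (by omega) hj2
      · omega
      · omega
  exact aux (r - l) l le_rfl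

lemma pvMinFrom_eq_of (cs : List Char) (count : Int) (hc : 0 ≤ count) (l l' r : Nat) (hll : l ≤ l')
    (h : ∀ j, l ≤ j → j < l' → count < pvD (pvWin cs j r)) :
    pvMinFrom cs count l r = pvMinFrom cs count l' r := by
  have aux : ∀ d l0, l' - l0 ≤ d → l0 ≤ l' →
      (∀ j, l0 ≤ j → j < l' → count < pvD (pvWin cs j r)) →
      pvMinFrom cs count l0 r = pvMinFrom cs count l' r := by
    intro d
    induction d with
    | zero =>
      intro l0 h1 h2 _
      have : l0 = l' := by omega
      rw [this]
    | succ d ih =>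
      intro l0 h1 h2 h3
      by_cases heq : l0 = l'
      · rw [heq]
      · have hD : count < pvD (pvWin cs l0 r) := h3 l0 le_rfl (by omega)
        have hlr : l0 < r := by
          by_contra hnot
          rw [pvWin_nil' cs l0 r (by omega), pvD_nil] at hD
          omega
        rw [pvMinFrom, dif_pos hlr, if_pos hD]
        exact ih (l0 + 1) (by omega) (by omega) (fun j hj1 hj2 => h3 j (by omega) hj2)
  exact aux (l' - l) l le_rfl hll h

lemma pvMinL_step (cs : List Char) (count : Int) (hc : 0 ≤ count) (r : Nat) :
    pvMinFrom cs count (pvMinL cs count r) (r + 1) = pvMinL cs count (r + 1) := by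
  unfold pvMinL
  refine (pvMinFrom_eq_of cs count hc 0 (pvMinFrom cs count 0 r) (r + 1)
    (le_pvMinFrom cs count 0 r) ?_).symm
  intro j _ hj
  have hjr : j < r := by
    have := pvMinFrom_le cs count 0 r (Nat.zero_le r)
    omega
  have h1 : count < pvD (pvWin cs j r) := pvMinFrom_min cs count 0 r j (Nat.zero_le j) hj
  have h2 : pvWin cs j (r + 1) = pvWin cs j r ++ pvWin cs r (r + 1) :=
    pvWin_split cs j r (r + 1) (by omega) (by omega)
  calc count < pvD (pvWin cs j r) := h1
    _ ≤ pvD (pvWin cs j (r + 1)) := by rw [h2]; exact pvD_append_le _ _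

-- the add-a-character step (shared by A's outer loop and B's inner loop)
lemma add_cat (t : List Char) (c : Char) (hgc : pvGood c) :
    (if PySem.List.pyGetD (pvHw t) ((c.toNat : Int) - 97) 0 = 0 then pvD t + 1 else pvD t)
      = pvD (t ++ [c]) := by
  rw [pyGetD_cell _ (length_pvHw t) c hgc, pvHw_getD t _ (pvCell_lt c), pvD_append]
  by_cases h : pvCnt t (pvCell c) = 0 <;> simp [h]

lemma add_w (t : List Char) (c : Char) (hgc : pvGood c) :
    PySem.List.pySetD (pvHw t) ((c.toNat : Int) - 97)
        (PySem.List.pyGetD (pvHw t) ((c.toNat : Int) - 97) 0 + 1) = pvHw (t ++ [c]) := by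
  rw [pyGetD_cell _ (length_pvHw t) c hgc, pySetD_cell _ (length_pvHw t) c hgc,
    pvHw_getD t _ (pvCell_lt c), pvHw_append]

lemma add_val (k : Int) (t : List Char) (c : Char) (hgc : pvGood c) :
    (if PySem.List.pyGetD (pvHw (t ++ [c])) ((c.toNat : Int) - 97) 0 = k then pvV k t + 1 else pvV k t)
      = pvV k (t ++ [c]) := by
  rw [pyGetD_cell _ (length_pvHw _) c hgc, pvHw_getD _ _ (pvCell_lt c), pvV_append]
  have h1 : pvCnt (t ++ [c]) (pvCell c) = pvCnt t (pvCell c) + 1 := by simp [pvCnt_append]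
  rw [h1]
  push_cast
  split_ifs <;> omega

-- the remove-leftmost-character step (A's shrink loop)
lemma rem_val (k : Int) (t : List Char) (c : Char) (hgc : pvGood c) :
    (if PySem.List.pyGetD (pvHw (c :: t)) ((c.toNat : Int) - 97) 0 = k then pvV k (c :: t) - 1
      else pvV k (c :: t)) = pvV k t := by
  rw [pyGetD_cell _ (length_pvHw _) c hgc, pvHw_getD _ _ (pvCell_lt c), pvV_cons,
    pvCnt_cons]
  simp only [if_pos rfl]
  push_cast
  split_ifs <;> omega

lemma rem_w (t : List Char) (c : Char) (hgc : pvGood c) :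
    PySem.List.pySetD (pvHw (c :: t)) ((c.toNat : Int) - 97)
        (PySem.List.pyGetD (pvHw (c :: t)) ((c.toNat : Int) - 97) 0 - 1) = pvHw t := by
  rw [pyGetD_cell _ (length_pvHw _) c hgc, pySetD_cell _ (length_pvHw _) c hgc,
    pvHw_getD _ _ (pvCell_lt c), pvHw_uncons]

lemma rem_cat (t : List Char) (c : Char) (hgc : pvGood c) :
    (if PySem.List.pyGetD (pvHw t) ((c.toNat : Int) - 97) 0 = 0 then pvD (c :: t) - 1
      else pvD (c :: t)) = pvD t := by
  rw [pyGetD_cell _ (length_pvHw t) c hgc, pvHw_getD t _ (pvCell_lt c), pvD_cons]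
  by_cases h : pvCnt t (pvCell c) = 0 <;> simp [h]

-- inner-loop characterisation: A's shrink loop moves left to pvMinFrom and keeps the
-- interpreted window state
lemma pvAInner_eq (cs : List Char) (k count : Int) (hg : ∀ c ∈ cs, pvGood c) (hc : 0 ≤ count) :
    ∀ fuel l r, l ≤ r → r ≤ cs.length → r - l ≤ fuel →
    pvAInner cs k count fuel l (pvHw (pvWin cs l r)) (pvD (pvWin cs l r)) (pvV k (pvWin cs l r)) =
      (pvMinFrom cs count l r, pvHw (pvWin cs (pvMinFrom cs count l r) r),
        pvD (pvWin cs (pvMinFrom cs count l r) r), pvV k (pvWin cs (pvMinFrom cs count l r) r)) := by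
  intro fuel
  induction fuel with
  | zero =>
    intro l r h1 h2 h3
    have hlr : l = r := by omega
    subst hlr
    rw [pvMinFrom, dif_neg (by omega), pvAInner]
  | succ fuel ih =>
    intro l r h1 h2 h3
    by_cases hD : count < pvD (pvWin cs l r)
    · have hlr : l < r := by
        by_contra hnot
        rw [pvWin_nil' cs l r (by omega), pvD_nil] at hD
        omega
      have hl : l < cs.length := by omega
      have hgood : pvGood (cs[l]'hl) := hg _ (List.getElem_mem hl)
      have hwin : pvWin cs l r = cs[l]'hl :: pvWin cs (l + 1) r := pvWin_cons cs l r hlr h2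
      rw [pvAInner, if_pos hD, List.getElem?_eq_getElem hl]
      simp only [hwin]
      rw [rem_val k _ _ hgood, rem_w _ _ hgood, rem_cat _ _ hgood]
      rw [ih (l + 1) r (by omega) h2 (by omega)]
      have hmf : pvMinFrom cs count l r = pvMinFrom cs count (l + 1) r := by
        rw [pvMinFrom, dif_pos hlr, if_pos hD]
      rw [hmf]
    · rw [pvAInner, if_neg hD]
      have hmf : pvMinFrom cs count l r = l := by
        rw [pvMinFrom]
        rw [if_neg hD]
        split_ifs <;> rfl
      rw [hmf]

lemma pvAOuter_eq (cs : List Char) (k count : Int) (hg : ∀ c ∈ cs, pvGood c) (hc : 0 ≤ count) :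
    ∀ gas r res, r ≤ cs.length → cs.length - r ≤ gas → 0 ≤ res →
    pvAOuter cs k count gas r (pvMinL cs count r) (pvHw (pvWin cs (pvMinL cs count r) r))
        (pvD (pvWin cs (pvMinL cs count r) r)) (pvV k (pvWin cs (pvMinL cs count r) r)) res =
      (List.range' (r + 1) (cs.length - r)).foldl (fun a r' => max a (pvContribA cs k count r')) res := by
  intro gas
  induction gas with
  | zero =>
    intro r res h1 h2 h3
    have hr : r = cs.length := by omega
    subst hr
    rw [pvAOuter, Nat.sub_self]
    rfl
  | succ gas ih =>
    intro r res h1 h2 h3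
    by_cases hr : r < cs.length
    · have hLle : pvMinL cs count r ≤ r := pvMinFrom_le cs count 0 r (Nat.zero_le r)
      have hgood : pvGood (cs[r]'hr) := hg _ (List.getElem_mem hr)
      have hwin : pvWin cs (pvMinL cs count r) (r + 1) = pvWin cs (pvMinL cs count r) r ++ [cs[r]'hr] :=
        pvWin_succ_r cs _ r hLle hr
      rw [pvAOuter, dif_pos hr]
      simp only []
      rw [add_cat _ _ hgood, add_w _ _ hgood, add_val k _ _ hgood, ← hwin]
      rw [pvAInner_eq cs k count hg hc (cs.length + 1) (pvMinL cs count r) (r + 1)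
        (by omega) (by omega) (by omega)]
      simp only []
      rw [pvMinL_step cs count hc r]
      have hres2 : (if pvV k (pvWin cs (pvMinL cs count (r + 1)) (r + 1)) = count
          then max res ((r : Int) + 1 - (pvMinL cs count (r + 1) : Int)) else res)
          = max res (pvContribA cs k count (r + 1)) := by
        unfold pvContribA
        split_ifs with h
        · push_cast
          ring_nf
        · omega
      rw [hres2, ih (r + 1) _ (by omega) (by omega) (le_trans h3 (le_max_left _ _))]
      have hlen : cs.length - r = (cs.length - (r + 1)) + 1 := by omega
      rw [hlen, List.range'_succ, List.foldl_cons]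
    · have hre : r = cs.length := by omega
      subst hre
      rw [pvAOuter, dif_neg (by omega), Nat.sub_self]
      rfl

lemma pvBInner_eq (cs : List Char) (k count : Int) (hg : ∀ c ∈ cs, pvGood c) (i : Nat) :
    ∀ gas j res, i ≤ j → j ≤ cs.length → cs.length - j ≤ gas → 0 ≤ res →
    pvBInner cs k count i gas j (pvHw (pvWin cs i j)) (pvD (pvWin cs i j)) (pvV k (pvWin cs i j)) res =
      (List.range' (j + 1) (cs.length - j)).foldl (fun a j' => max a (pvContribB cs k count i j')) res := by
  intro gas
  induction gas with
  | zero =>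
    intro j res h1 h2 h3 h4
    have hj : j = cs.length := by omega
    subst hj
    rw [pvBInner, Nat.sub_self]
    rfl
  | succ gas ih =>
    intro j res h1 h2 h3 h4
    by_cases hj : j < cs.length
    · have hgood : pvGood (cs[j]'hj) := hg _ (List.getElem_mem hj)
      have hwin : pvWin cs i (j + 1) = pvWin cs i j ++ [cs[j]'hj] :=
        pvWin_succ_r cs i j h1 hj
      rw [pvBInner, dif_pos hj]
      simp only []
      rw [add_cat _ _ hgood, add_w _ _ hgood, add_val k _ _ hgood, ← hwin]
      have hres1 : (if pvD (pvWin cs i (j + 1)) = count ∧ pvV k (pvWin cs i (j + 1)) = count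
          then max res ((j : Int) + 1 - (i : Int)) else res)
          = max res (pvContribB cs k count i (j + 1)) := by
        unfold pvContribB
        split_ifs with h
        · push_cast
          ring_nf
        · omega
      rw [hres1, ih (j + 1) _ (by omega) (by omega) (by omega) (le_trans h4 (le_max_left _ _))]
      have hlen : cs.length - j = (cs.length - (j + 1)) + 1 := by omega
      rw [hlen, List.range'_succ, List.foldl_cons]
    · have hje : j = cs.length := by omega
      subst hje
      rw [pvBInner, dif_neg (by omega), Nat.sub_self]
      rfl

lemma pvBOuter_eq (cs : List Char) (k count : Int) (hg : ∀ c ∈ cs, pvGood c) :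
    ∀ gas i res, i ≤ cs.length → cs.length - i ≤ gas → 0 ≤ res →
    pvBOuter cs k count gas i res =
      (List.range' i (cs.length - i)).foldl
        (fun a i' => (List.range' (i' + 1) (cs.length - i')).foldl
          (fun b j => max b (pvContribB cs k count i' j)) a) res := by
  intro gas
  induction gas with
  | zero =>
    intro i res h1 h2 h3
    have hi : i = cs.length := by omega
    subst hi
    rw [pvBOuter, Nat.sub_self]
    rfl
  | succ gas ih =>
    intro i res h1 h2 h3
    by_cases hi : i < cs.length
    · rw [pvBOuter, dif_pos hi]
      have hinit : pvBInner cs k count i cs.length i (List.replicate 26 0) 0 0 res =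
          (List.range' (i + 1) (cs.length - i)).foldl (fun a j' => max a (pvContribB cs k count i j')) res := by
        have h := pvBInner_eq cs k count hg i cs.length i res le_rfl (by omega) (by omega) h3
        rw [pvWin_nil, pvHw_nil, pvD_nil, pvV_nil] at h
        exact h
      have hresnn : 0 ≤ (List.range' (i + 1) (cs.length - i)).foldl
          (fun a j' => max a (pvContribB cs k count i j')) res :=
        le_trans h3 (PySem.List.le_foldl_max_int _ _ _).1
      have hr : List.range' i (cs.length - i) = i :: List.range' (i + 1) (cs.length - (i + 1)) := by
        have hlen : cs.length - i = (cs.length - (i + 1)) + 1 := by omega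
        rw [hlen, List.range'_succ]
      rw [hinit, ih (i + 1) _ (by omega) (by omega) hresnn, hr, List.foldl_cons]
    · have hie : i = cs.length := by omega
      subst hie
      rw [pvBOuter, dif_neg (by omega), Nat.sub_self]
      rfl

-- fold-max utilities
lemma foldl_max_le_int {α : Type} (f : α → Int) (M : Int) :
    ∀ (L : List α) (init : Int), init ≤ M → (∀ x ∈ L, f x ≤ M) →
      L.foldl (fun a x => max a (f x)) init ≤ M := by
  intro L
  induction L with
  | nil => intro init h _; simpa using h
  | cons x t ih =>
    intro init h hall
    simp only [List.foldl_cons]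
    exact ih _ (by simp [h, hall x (by simp)]) (fun y hy => hall y (by simp [hy]))

lemma le_nested_init (cs : List Char) (k count : Int) :
    ∀ (L : List Nat) (init : Int),
    init ≤ L.foldl (fun a i' => (List.range' (i' + 1) (cs.length - i')).foldl
      (fun b j => max b (pvContribB cs k count i' j)) a) init := by
  intro L
  induction L with
  | nil => intro init; simp
  | cons x t ih =>
    intro init
    simp only [List.foldl_cons]
    exact le_trans (PySem.List.le_foldl_max_int _ _ _).1 (ih _)

lemma contribB_le_nested (cs : List Char) (k count : Int) (i j : Nat) (L : List Nat) (hiL : i ∈ L)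
    (hj : j ∈ List.range' (i + 1) (cs.length - i)) (init : Int) :
    pvContribB cs k count i j ≤ L.foldl (fun a i' => (List.range' (i' + 1) (cs.length - i')).foldl
      (fun b j' => max b (pvContribB cs k count i' j')) a) init := by
  obtain ⟨s, t, rfl⟩ := List.append_of_mem hiL
  rw [List.foldl_append, List.foldl_cons]
  exact le_trans ((PySem.List.le_foldl_max_int _ _ _).2 j hj) (le_nested_init cs k count t _)

lemma nested_le (cs : List Char) (k count M : Int) :
    ∀ (L : List Nat) (init : Int), init ≤ M →
      (∀ i' ∈ L, ∀ j ∈ List.range' (i' + 1) (cs.length - i'), pvContribB cs k count i' j ≤ M) →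
      L.foldl (fun a i' => (List.range' (i' + 1) (cs.length - i')).foldl
        (fun b j => max b (pvContribB cs k count i' j)) a) init ≤ M := by
  intro L
  induction L with
  | nil => intro init h _; simpa using h
  | cons x t ih =>
    intro init h hall
    simp only [List.foldl_cons]
    apply ih
    · exact foldl_max_le_int _ M _ init h (fun j hj => hall x (by simp) j hj)
    · intro i' hi' j hj
      exact hall i' (by simp [hi']) j hj

-- the maximum each side computes
lemma key_A_le_B (cs : List Char) (k count : Int) (hc : 0 ≤ count) (r : Nat)
    (hr1 : 1 ≤ r) (hr : r ≤ cs.length) :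
    pvContribA cs k count r ≤
      (List.range' 0 cs.length).foldl
        (fun a i' => (List.range' (i' + 1) (cs.length - i')).foldl
          (fun b j => max b (pvContribB cs k count i' j)) a) 0 := by
  unfold pvContribA
  split_ifs with hV
  · have hLle : pvMinL cs count r ≤ r := pvMinFrom_le cs count 0 r (Nat.zero_le r)
    by_cases hLr : pvMinL cs count r < r
    · have hD : pvD (pvWin cs (pvMinL cs count r) r) ≤ count :=
        pvMinFrom_spec cs count 0 r (Nat.zero_le r) hc
      have hVD := pvV_le_pvD k (pvWin cs (pvMinL cs count r) r)
      have hDc : pvD (pvWin cs (pvMinL cs count r) r) = count := by omega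
      have hcb : pvContribB cs k count (pvMinL cs count r) r = (r : Int) - (pvMinL cs count r : Int) := by
        unfold pvContribB
        rw [if_pos ⟨hDc, hV⟩]
      rw [← hcb]
      apply contribB_le_nested
      · exact List.mem_range'_1.mpr ⟨Nat.zero_le _, by omega⟩
      · exact List.mem_range'_1.mpr ⟨by omega, by omega⟩
    · have hLeq : pvMinL cs count r = r := by omega
      rw [hLeq, sub_self]
      exact le_nested_init cs k count _ 0
  · exact le_nested_init cs k count _ 0

lemma key_B_le_A (cs : List Char) (k count : Int) (hc : 0 ≤ count) (i j : Nat)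
    (hij : i < j) (hj : j ≤ cs.length) :
    pvContribB cs k count i j ≤
      (List.range' 1 cs.length).foldl (fun a r' => max a (pvContribA cs k count r')) 0 := by
  unfold pvContribB
  split_ifs with hcond
  · obtain ⟨hD, hV⟩ := hcond
    have hminle : pvMinL cs count j ≤ i := by
      by_contra hnot
      unfold pvMinL at hnot
      have h2 := pvMinFrom_min cs count 0 j i (Nat.zero_le i) (by omega)
      omega
    have hVle : pvV k (pvWin cs i j) ≤ pvV k (pvWin cs (pvMinL cs count j) j) := by
      rw [pvWin_split cs (pvMinL cs count j) i j hminle (le_of_lt hij)]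
      exact pvV_le_append_left _ _ _
    have hDle : pvD (pvWin cs (pvMinL cs count j) j) ≤ count :=
      pvMinFrom_spec cs count 0 j (Nat.zero_le j) hc
    have hVD := pvV_le_pvD k (pvWin cs (pvMinL cs count j) j)
    have hVeq : pvV k (pvWin cs (pvMinL cs count j) j) = count := by omega
    have hca : pvContribA cs k count j = (j : Int) - (pvMinL cs count j : Int) := by
      unfold pvContribA
      rw [if_pos hVeq]
    have hle : (j : Int) - (i : Int) ≤ pvContribA cs k count j := by
      rw [hca]
      have : (pvMinL cs count j : Int) ≤ (i : Int) := by exact_mod_cast hminle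
      omega
    exact le_trans hle ((PySem.List.le_foldl_max_int _ _ _).2 j
      (List.mem_range'_1.mpr ⟨by omega, by omega⟩))
  · exact (PySem.List.le_foldl_max_int _ _ _).1

lemma main_eq (cs : List Char) (k count : Int) (hg : ∀ c ∈ cs, pvGood c) (hc : 0 ≤ count) :
    pvAOuter cs k count cs.length 0 0 (List.replicate 26 0) 0 0 0 =
      pvBOuter cs k count cs.length 0 0 := by
  have hA0 : pvMinL cs count 0 = 0 := by
    rw [pvMinL, pvMinFrom]
    simp
  have e1 : pvAOuter cs k count cs.length 0 0 (List.replicate 26 0) 0 0 0 =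
      (List.range' 1 cs.length).foldl (fun a r' => max a (pvContribA cs k count r')) 0 := by
    have h := pvAOuter_eq cs k count hg hc cs.length 0 0 (Nat.zero_le _) (by omega) le_rfl
    rw [hA0, pvWin_nil, pvHw_nil, pvD_nil, pvV_nil] at h
    simpa using h
  have e2 : pvBOuter cs k count cs.length 0 0 =
      (List.range' 0 cs.length).foldl
        (fun a i' => (List.range' (i' + 1) (cs.length - i')).foldl
          (fun b j => max b (pvContribB cs k count i' j)) a) 0 := by
    have h := pvBOuter_eq cs k count hg cs.length 0 0 (Nat.zero_le _) (by omega) le_rfl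
    simpa using h
  rw [e1, e2]
  apply le_antisymm
  · apply foldl_max_le_int _ _ _ 0 (le_nested_init cs k count _ 0)
    intro r hrmem
    obtain ⟨hr1, hr2⟩ := List.mem_range'_1.mp hrmem
    exact key_A_le_B cs k count hc r hr1 (by omega)
  · apply nested_le _ _ _ _ _ 0 ((PySem.List.le_foldl_max_int _ _ _).1)
    intro i' hi' j hj
    obtain ⟨hi1, hi2⟩ := List.mem_range'_1.mp hi'
    obtain ⟨hj1, hj2⟩ := List.mem_range'_1.mp hj
    exact key_B_le_A cs k count hc i' j (by omega) (by omega)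

-- ===== VERDICT (by name: the statement is the Claim_ definition above) =====
theorem longestKLetterSubstr_spec : Claim_equal_longestKLetterSubstr := by
  intro s k count _ hpre
  obtain ⟨hall, hcase⟩ := hpre
  have hg : ∀ c ∈ s.toList, pvGood c := by
    intro c hc
    have := List.all_eq_true.mp hall c hc
    simpa [pvInRange, pvGood] using this
  unfold Spec_longestKLetterSubstr longestKLetterSubstr longestKLetterSubstr_alt
  rcases hcase with hc | hnil
  · exact main_eq s.toList k count hg hc
  · rw [hnil]
    rfl
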